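-- pv_equiv track=rewrite | github.com/mufazzalshokh/ai-microservices-platform | document-service/app/services/chunker.py | _find_boundary
-- ===== SOURCE A (Python) =====
-- def _find_boundary(text: str, pos: int) -> int:
--     """
--     Look backward from pos to find a good split point.
--     Prefers sentence endings, then word boundaries.
--     """
--     search_start = max(0, pos - 100)
--     segment = text[search_start:pos]
--
--     for i in reversed(range(len(segment))):
--         if segment[i] in ".!?":
--             return search_start + i + 1
--
--     for i in reversed(range(len(segment))):
--         if segment[i] in " \n\t":
--             return search_start + i + 1
--
--     return pos
-- ===== SOURCE B (Python) =====
-- def _find_boundary(text: str, pos: int) -> int: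
--     """Single forward pass: remember the last sentence-ending and the last
--     whitespace index seen; decide once at the end (sentence endings win)."""
--     search_start = max(0, pos - 100)
--     segment = text[search_start:pos]
--
--     last_sentence = -1
--     last_word = -1
--     for i, c in enumerate(segment):
--         if c in ".!?":
--             last_sentence = i
--         elif c in " \n\t":
--             last_word = i
--
--     if last_sentence >= 0:
--         return search_start + last_sentence + 1
--     if last_word >= 0:
--         return search_start + last_word + 1
--     return pos
-- ===== Notes on version B (the rewrite author's own statement) =====
-- stated objective: alternative
-- what changed: Replaced A's two reverse short-circuiting index scans by one forward pass that accumulates the last sentence-ending and last whitespace index and decides once at the end.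
import Mathlib
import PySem

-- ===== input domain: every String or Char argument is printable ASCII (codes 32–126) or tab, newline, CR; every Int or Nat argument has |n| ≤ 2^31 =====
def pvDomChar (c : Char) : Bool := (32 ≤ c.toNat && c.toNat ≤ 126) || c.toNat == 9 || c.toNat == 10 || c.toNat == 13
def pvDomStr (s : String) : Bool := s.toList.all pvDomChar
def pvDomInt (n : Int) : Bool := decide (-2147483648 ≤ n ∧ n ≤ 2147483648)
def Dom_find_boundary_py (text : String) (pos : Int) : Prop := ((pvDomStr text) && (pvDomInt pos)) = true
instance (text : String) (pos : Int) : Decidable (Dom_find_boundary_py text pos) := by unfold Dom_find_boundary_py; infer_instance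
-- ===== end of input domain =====

-- B replaces A's two reverse short-circuiting scans by one forward pass that
-- accumulates the last sentence-ending and last whitespace index (alternative decomposition).

-- ===== PORT A =====
-- A: reverse scan for '.!?', then reverse scan for ' \n\t', else pos.
def find_boundary_py (text : String) (pos : Int) : Int :=
  let search_start : Int := max 0 (pos - 100)
  let segment : List Char := PySem.List.slice text.toList (some search_start) (some pos)
  match (List.range segment.length).reverse.find?
      (fun i => ['.', '!', '?'].contains (segment.getD i ' ')) with
  | some i => search_start + (i : Int) + 1
  | none =>
    match (List.range segment.length).reverse.find?
        (fun i => [' ', '\n', '\t'].contains (segment.getD i ' ')) with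
    | some i => search_start + (i : Int) + 1
    | none => pos

-- ===== PORT B =====
-- B: one forward pass keeping (last_sentence, last_word), decided once at the end.
def find_boundary_py_alt (text : String) (pos : Int) : Int :=
  let search_start : Int := max 0 (pos - 100)
  let segment : List Char := PySem.List.slice text.toList (some search_start) (some pos)
  let st : Int × Int :=
    (PySem.List.enumerate segment 0).foldl
      (fun (p : Int × Int) ic =>
        if ['.', '!', '?'].contains ic.2 then (ic.1, p.2)
        else if [' ', '\n', '\t'].contains ic.2 then (p.1, ic.1)
        else p)
      (-1, -1)
  if st.1 ≥ 0 then search_start + st.1 + 1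
  else if st.2 ≥ 0 then search_start + st.2 + 1
  else pos

-- ===== PRECONDITION & SPEC =====
def Spec_find_boundary_py (text : String) (pos : Int) (out : Int) : Prop := out = find_boundary_py_alt text pos
instance (text : String) (pos : Int) (out : Int) : Decidable (Spec_find_boundary_py text pos out) := by unfold Spec_find_boundary_py; infer_instance

-- ===== CLAIM (what is proved, stated in full; the proofs are below) =====
def Claim_equal_find_boundary_py : Prop := ∀ (text : String) (pos : Int), Dom_find_boundary_py text pos → Spec_find_boundary_py text pos (find_boundary_py text pos)

-- ===== LEMMAS AND PROOFS =====

-- B's pair fold splits into two independent folds when the two character classes are disjoint.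
lemma pv_fold_pair (sB wB : Char → Bool) (hdisj : ∀ c, sB c = true → wB c = false)
    (l : List (Int × Char)) (a b : Int) :
    l.foldl (fun (p : Int × Int) ic =>
        if sB ic.2 then (ic.1, p.2) else if wB ic.2 then (p.1, ic.1) else p) (a, b)
      = (l.foldl (fun x ic => if sB ic.2 then ic.1 else x) a,
         l.foldl (fun x ic => if wB ic.2 then ic.1 else x) b) := by
  induction l generalizing a b with
  | nil => rfl
  | cons hd tl ih =>
    simp only [List.foldl_cons]
    by_cases hs : sB hd.2
    · simp [hs, hdisj hd.2 hs, ih]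
    · by_cases hw : wB hd.2 <;> simp [hs, hw, ih]

-- getD through an appended element, below the length of the prefix.
lemma pv_find?_getD_append (xs : List Char) (x d : Char) (p : Char → Bool)
    (l : List Nat) (h : ∀ i ∈ l, i < xs.length) :
    l.find? (fun i => p ((xs ++ [x]).getD i d)) = l.find? (fun i => p (xs.getD i d)) := by
  induction l with
  | nil => rfl
  | cons hd tl ih =>
    have hhd : hd < xs.length := h hd (by simp)
    have hgd : (xs ++ [x]).getD hd d = xs.getD hd d := by
      simp [List.getD, List.getElem?_append_left hhd]
    simp only [List.find?_cons, hgd]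
    split
    · rfl
    · exact ih (fun i hi => h i (by simp [hi]))

-- The forward "keep the last matching index" fold equals the reverse "first match" scan.
lemma pv_last_eq (seg : List Char) (p : Char → Bool) (a : Int) :
    (PySem.List.enumerate seg 0).foldl (fun x ic => if p ic.2 then ic.1 else x) a
      = (match (List.range seg.length).reverse.find? (fun i => p (seg.getD i ' ')) with
         | some i => (i : Int)
         | none => a) := by
  induction seg using List.reverseRecOn generalizing a with
  | nil => simp [PySem.List.enumerate]
  | append_singleton xs x ih =>
    rw [PySem.List.enumerate_append, List.foldl_append]
    simp only [PySem.List.enumerate_cons, PySem.List.enumerate_nil, List.foldl_cons,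
      List.foldl_nil, List.length_append, List.length_cons, List.length_nil,
      List.range_succ, List.reverse_append, List.reverse_cons, List.reverse_nil]
    simp only [List.nil_append, List.cons_append, List.find?_cons]
    have hgx : (xs ++ [x]).getD xs.length ' ' = x := by
      simp [List.getD]
    rw [hgx]
    by_cases hp : p x
    · simp [hp]
    · simp only [hp]
      rw [pv_find?_getD_append xs x ' ' p _ (by intro i hi; simp at hi; omega)]
      simp only [zero_add]
      exact ih a

lemma pv_disj : ∀ c : Char, ['.', '!', '?'].contains c = true → [' ', '\n', '\t'].contains c = false := by
  intro c hc
  simp only [List.contains_eq_mem, List.mem_cons, List.not_mem_nil, or_false, decide_eq_true_eq] at hc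
  rcases hc with rfl | rfl | rfl <;> decide

-- ===== VERDICT (by name: the statement is the Claim_ definition above) =====
theorem find_boundary_py_spec : Claim_equal_find_boundary_py := by
  intro text pos _
  unfold Spec_find_boundary_py find_boundary_py find_boundary_py_alt
  dsimp only
  rw [pv_fold_pair _ _ pv_disj, pv_last_eq, pv_last_eq]
  cases hS : (List.range (PySem.List.slice text.toList (some (max 0 (pos - 100))) (some pos)).length).reverse.find?
      (fun i => ['.', '!', '?'].contains ((PySem.List.slice text.toList (some (max 0 (pos - 100))) (some pos)).getD i ' ')) with
  | some i => simp
  | none =>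
    cases hW : (List.range (PySem.List.slice text.toList (some (max 0 (pos - 100))) (some pos)).length).reverse.find?
        (fun i => [' ', '\n', '\t'].contains ((PySem.List.slice text.toList (some (max 0 (pos - 100))) (some pos)).getD i ' ')) with
    | some j => simp
    | none => simp
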